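-- pv_equiv track=rewrite | github.com/alexcrevel/Exercices | Pendu/functions.py | play_char
-- ===== SOURCE A (Python) =====
-- def play_char(char, word):
--     temp_word = ""
--     char_founded = False
--     for letter in word:
--         if letter in char:
--             temp_word += letter
--             if char[-1] == letter:
--                 char_founded = True
--         else:
--             temp_word += "*"
--     return char_founded, temp_word
-- ===== SOURCE B (Python) =====
-- def play_char(char, word):
--     # Index the word once: letter -> list of positions where it occurs.
--     positions = {}
--     for i, letter in enumerate(word):
--         positions.setdefault(letter, []).append(i)
--     # Start with a fully masked word and unmask by direct index writes,
--     # one dictionary lookup per guessed letter (no scan of word per letter).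
--     mask = ["*"] * len(word)
--     for c in set(char):
--         for i in positions.get(c, ()):
--             mask[i] = c
--     char_founded = bool(char) and char[-1] in positions
--     return char_founded, "".join(mask)
-- ===== Notes on version B (the rewrite author's own statement) =====
-- stated objective: alternative
-- what changed: B builds a positions index (letter -> list of indices) of the word once, then unmasks a '*'-filled array by direct index writes for each distinct guessed letter and computes the flag by a dictionary membership test, instead of A's single pass over the word that scans char for every letter and threads a boolean flag through the loop.
import Mathlib
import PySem

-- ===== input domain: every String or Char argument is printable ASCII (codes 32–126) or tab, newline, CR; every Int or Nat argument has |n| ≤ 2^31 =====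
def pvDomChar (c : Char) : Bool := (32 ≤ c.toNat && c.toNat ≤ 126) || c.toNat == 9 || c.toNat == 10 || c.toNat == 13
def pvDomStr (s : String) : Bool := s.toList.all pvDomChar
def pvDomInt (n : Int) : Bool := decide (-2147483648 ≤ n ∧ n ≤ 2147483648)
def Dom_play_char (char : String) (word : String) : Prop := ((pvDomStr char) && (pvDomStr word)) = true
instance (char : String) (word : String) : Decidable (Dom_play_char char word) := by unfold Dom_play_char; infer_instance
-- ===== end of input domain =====

-- B replaces A's single scanning pass (which tests 'letter in char' for every letter of word
-- and threads a boolean flag) by an index: positions of each letter of word are recorded in a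
-- dictionary once, then a fully masked array is unmasked by direct index writes per guessed
-- letter, and the flag is a dictionary membership test.

-- ===== PORT A =====
-- one pass over word: grow temp_word, flip char_founded when the guess's last char is seen
def play_char (char : String) (word : String) : Bool × String :=
  let r := word.toList.foldl
    (fun (st : Bool × List Char) letter =>
      if PySem.Chars.isIn [letter] char.toList then
        (if PySem.List.pyGet? char.toList (-1) = some letter then true else st.1,
         st.2 ++ [letter])
      else (st.1, st.2 ++ ['*'])) (false, [])
  (r.1, String.ofList r.2)

-- ===== PORT B =====
-- positions: letter -> indices (setdefault(k, []).append(i) = modify k [] (· ++ [i]));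
-- mask: ["*"]*len(word), then mask[i] = c for each index i of each distinct guessed letter c
-- (set(char) ported in first-occurrence order; writes of distinct letters are at disjoint indices);
-- flag: bool(char) and char[-1] in positions (short-circuit guards the [-1] access)
def play_char_alt (char : String) (word : String) : Bool × String :=
  let ws := word.toList
  let cs := char.toList
  let positions := (PySem.List.enumerate ws 0).foldl
      (fun (d : PySem.Dict Char (List Int)) p => d.modify p.2 [] (· ++ [p.1])) PySem.Dict.empty
  let mask0 := List.replicate ws.length '*'
  let mask := (PySem.Set.ofList cs).foldl
      (fun m c => (positions.getD c []).foldl (fun m i => PySem.List.pySetD m i c) m) mask0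
  let char_founded := !cs.isEmpty &&
    (match PySem.List.pyGet? cs (-1) with
     | some c => positions.contains c
     | none => false)
  (char_founded, String.ofList mask)

-- ===== PRECONDITION & SPEC =====
def Spec_play_char (char : String) (word : String) (out : Bool × String) : Prop := out = play_char_alt char word
instance (char : String) (word : String) (out : Bool × String) : Decidable (Spec_play_char char word out) := by unfold Spec_play_char; infer_instance

-- ===== CLAIM (what is proved, stated in full; the proofs are below) =====
def Claim_equal_play_char : Prop := ∀ (char : String) (word : String), Dom_play_char char word → Spec_play_char char word (play_char char word)

-- ===== LEMMAS AND PROOFS =====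

-- 'l in char' for a single character l is membership
theorem isIn_singleton (l : Char) (cs : List Char) :
    PySem.Chars.isIn [l] cs = true ↔ l ∈ cs := by
  rw [PySem.Chars.isIn_iff_infix]; exact List.singleton_infix_iff l cs

-- invariant of A's loop: mask appended elementwise, flag = old flag OR "last char of cs met"
theorem foldA_spec (cs : List Char) (ws : List Char) (b : Bool) (acc : List Char) :
    ws.foldl
      (fun (st : Bool × List Char) letter =>
        if PySem.Chars.isIn [letter] cs then
          (if PySem.List.pyGet? cs (-1) = some letter then true else st.1,
           st.2 ++ [letter])
        else (st.1, st.2 ++ ['*'])) (b, acc)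
    = (b || ws.any (fun l => PySem.List.pyGet? cs (-1) == some l),
       acc ++ ws.map (fun l => if PySem.Chars.isIn [l] cs then l else '*')) := by
  induction ws generalizing b acc with
  | nil => simp
  | cons l ws ih =>
    rw [List.foldl_cons]
    by_cases hin : PySem.Chars.isIn [l] cs = true
    · rw [if_pos hin]
      by_cases hlast : PySem.List.pyGet? cs (-1) = some l
      · rw [if_pos hlast, ih]; simp [hin, hlast]
      · rw [if_neg hlast, ih]
        have hb : (PySem.List.pyGet? cs (-1) == some l) = false := by simpa using hlast
        simp [hin, hb]
    · have hlast : ¬ PySem.List.pyGet? cs (-1) = some l := by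
        intro h
        exact hin ((isIn_singleton l cs).mpr (PySem.List.mem_of_pyGet?_eq_some cs h))
      rw [if_neg hin, ih]
      have hb : (PySem.List.pyGet? cs (-1) == some l) = false := by simpa using hlast
      simp [hin, hb]

theorem positions_getD (ws : List Char) (c : Char) :
    ((PySem.List.enumerate ws 0).foldl
        (fun (d : PySem.Dict Char (List Int)) p => d.modify p.2 [] (· ++ [p.1]))
        PySem.Dict.empty).getD c []
      = ((PySem.List.enumerate ws 0).filter (fun p => p.2 == c)).map (·.1) := by
  have h : (PySem.List.enumerate ws 0).foldl
        (fun (d : PySem.Dict Char (List Int)) p => d.modify p.2 [] (· ++ [p.1]))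
        PySem.Dict.empty
      = ((PySem.List.enumerate ws 0).map Prod.swap).foldl
        (fun (d : PySem.Dict Char (List Int)) q => d.modify q.1 [] (· ++ [q.2]))
        PySem.Dict.empty := by
    rw [List.foldl_map]; rfl
  rw [h, PySem.Dict.getD_foldl_modify_append]
  rw [List.filter_map, List.map_map]
  rfl

theorem mem_positions_getD (ws : List Char) (c : Char) (i : Int) :
    i ∈ ((PySem.List.enumerate ws 0).foldl
        (fun (d : PySem.Dict Char (List Int)) p => d.modify p.2 [] (· ++ [p.1]))
        PySem.Dict.empty).getD c []
      ↔ ∃ (k : Nat), ∃ (h : k < ws.length), i = (k : Int) ∧ ws[k] = c := by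
  rw [positions_getD]
  simp only [List.mem_map, List.mem_filter, PySem.List.mem_enumerate_iff]
  constructor
  · rintro ⟨p, ⟨⟨k, hk, rfl⟩, hc⟩, rfl⟩
    exact ⟨k, hk, by simp, by simpa using hc⟩
  · rintro ⟨k, hk, rfl, hc⟩
    exact ⟨((k : Int), ws[k]), ⟨⟨k, hk, by simp⟩, by simp [hc]⟩, rfl⟩

theorem positions_contains (ws : List Char) (c : Char) :
    ((PySem.List.enumerate ws 0).foldl
        (fun (d : PySem.Dict Char (List Int)) p => d.modify p.2 [] (· ++ [p.1]))
        PySem.Dict.empty).contains c = decide (c ∈ ws) := by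
  have h := PySem.Dict.keys_foldl_modify_key (l := PySem.List.enumerate ws 0)
      (key := fun p => p.2) (d0 := ([] : List Int)) (f := fun _ p l => l ++ [p.1])
      (d := (PySem.Dict.empty : PySem.Dict Char (List Int)))
  simp only at h
  rw [PySem.Dict.contains_eq_decide_mem_keys, h]
  simp [PySem.Set.mem_update, PySem.List.map_snd_enumerate, PySem.Dict.keys_empty]

theorem inner_len (idxs : List Int) (mask : List Char) (c : Char) :
    (idxs.foldl (fun m i => PySem.List.pySetD m i c) mask).length = mask.length := by
  induction idxs generalizing mask with
  | nil => rfl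
  | cons i rest ih => rw [List.foldl_cons, ih, PySem.List.length_pySetD]

theorem inner_fold (idxs : List Int) (mask : List Char) (c : Char)
    (h : ∀ i ∈ idxs, 0 ≤ i ∧ i.toNat < mask.length) (j : Nat) :
    (idxs.foldl (fun m i => PySem.List.pySetD m i c) mask)[j]?
      = if (j : Int) ∈ idxs then some c else mask[j]? := by
  induction idxs generalizing mask with
  | nil => simp
  | cons i rest ih =>
    obtain ⟨hi0, hilt⟩ := h i (List.mem_cons_self ..)
    rw [List.foldl_cons, PySem.List.pySetD_of_nonneg _ _ hi0]
    rw [ih _ (fun x hx => by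
      have := h x (List.mem_cons_of_mem _ hx)
      simpa [List.length_set] using this)]
    by_cases hr : (j : Int) ∈ rest
    · simp [hr]
    · by_cases hij : (j : Int) = i
      · have hj : j = i.toNat := by omega
        subst hj
        simp [hij, hilt]
      · have hj : j ≠ i.toNat := by omega
        simp only [List.mem_cons, hr, hij, or_self, if_false, List.getElem?_set]
        rw [if_neg (fun he => hj he.symm)]

theorem outer_fold (cs ws : List Char) (mask : List Char) (hlen : mask.length = ws.length)
    (j : Nat) :
    (cs.foldl
      (fun m c => ((((PySem.List.enumerate ws 0).foldl
          (fun (d : PySem.Dict Char (List Int)) p => d.modify p.2 [] (· ++ [p.1]))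
          PySem.Dict.empty)).getD c []).foldl (fun m i => PySem.List.pySetD m i c) m)
      mask)[j]?
    = match ws[j]? with
      | some w => if w ∈ cs then some w else mask[j]?
      | none => none := by
  induction cs generalizing mask with
  | nil =>
    cases hw : ws[j]? with
    | some w => simp
    | none =>
      have hle : ws.length ≤ j := List.getElem?_eq_none_iff.mp hw
      simp [List.getElem?_eq_none (show mask.length ≤ j by omega)]
  | cons c rest ih =>
    rw [List.foldl_cons]
    have hmem : ∀ i ∈ (((PySem.List.enumerate ws 0).foldl
          (fun (d : PySem.Dict Char (List Int)) p => d.modify p.2 [] (· ++ [p.1]))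
          PySem.Dict.empty)).getD c [], 0 ≤ i ∧ i.toNat < mask.length := by
      intro i hi
      obtain ⟨k, hk, rfl, _⟩ := (mem_positions_getD ws c i).mp hi
      constructor
      · omega
      · simpa [hlen] using hk
    rw [ih _ (by rw [inner_len, hlen])]
    cases hw : ws[j]? with
    | none => rfl
    | some w =>
      obtain ⟨hj, hwj⟩ := List.getElem?_eq_some_iff.mp hw
      by_cases hwr : w ∈ rest
      · simp [hwr]
      · simp only [hwr, if_false]
        rw [inner_fold _ _ _ hmem]
        by_cases hwc : w = c
        · have : (j : Int) ∈ (((PySem.List.enumerate ws 0).foldl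
              (fun (d : PySem.Dict Char (List Int)) p => d.modify p.2 [] (· ++ [p.1]))
              PySem.Dict.empty)).getD c [] :=
            (mem_positions_getD ws c j).mpr ⟨j, hj, rfl, by rw [hwj, hwc]⟩
          simp [this, hwc]
        · have : (j : Int) ∉ (((PySem.List.enumerate ws 0).foldl
              (fun (d : PySem.Dict Char (List Int)) p => d.modify p.2 [] (· ++ [p.1]))
              PySem.Dict.empty)).getD c [] := by
            intro hmem'
            obtain ⟨k, hk, hkj, hc⟩ := (mem_positions_getD ws c _).mp hmem'
            have hkj' : k = j := by omega
            subst hkj'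
            rw [hwj] at hc
            exact hwc hc
          simp [this, hwc, List.mem_cons, hwr]

theorem flag_eq (cs ws : List Char) :
    (ws.any (fun l => PySem.List.pyGet? cs (-1) == some l))
    = (!cs.isEmpty &&
        (match PySem.List.pyGet? cs (-1) with
         | some c => decide (c ∈ ws)
         | none => false)) := by
  cases hcs : cs with
  | nil => simp [PySem.List.pyGet?]
  | cons c0 cs' =>
    have hne : (c0 :: cs') ≠ [] := by simp
    have hlast : PySem.List.pyGet? (c0 :: cs') (-1) = some ((c0 :: cs').getLast hne) := by
      rw [PySem.List.pyGet?_neg_one, List.getLast?_eq_some_getLast]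
    rw [hlast]
    simp only [List.isEmpty_cons, Bool.not_false, Bool.true_and]
    rcases h : decide ((c0 :: cs').getLast hne ∈ ws) with _ | _
    · have hm : (c0 :: cs').getLast hne ∉ ws := of_decide_eq_false h
      simp only [List.any_eq_false]
      intro l hl
      simp only [beq_iff_eq, Option.some.injEq]
      intro he; exact hm (he ▸ hl)
    · have hm : (c0 :: cs').getLast hne ∈ ws := of_decide_eq_true h
      simp only [List.any_eq_true]
      exact ⟨_, hm, by simp⟩

theorem mask_eq (cs ws : List Char) :
    (PySem.Set.ofList cs).foldl
      (fun m c => ((((PySem.List.enumerate ws 0).foldl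
          (fun (d : PySem.Dict Char (List Int)) p => d.modify p.2 [] (· ++ [p.1]))
          PySem.Dict.empty)).getD c []).foldl (fun m i => PySem.List.pySetD m i c) m)
      (List.replicate ws.length '*')
    = ws.map (fun l => if PySem.Chars.isIn [l] cs then l else '*') := by
  apply List.ext_getElem?
  intro j
  rw [outer_fold _ _ _ (by simp) j]
  simp only [PySem.Set.mem_ofList]
  cases hw : ws[j]? with
  | none =>
    have hle : ws.length ≤ j := List.getElem?_eq_none_iff.mp hw
    simp [List.getElem?_eq_none (show (ws.map _).length ≤ j by simpa using hle)]
  | some w =>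
    obtain ⟨hj, hwj⟩ := List.getElem?_eq_some_iff.mp hw
    rw [List.getElem?_map, hw]
    by_cases hmem : w ∈ cs
    · simp [hmem, (isIn_singleton w cs).mpr hmem]
    · have hni : PySem.Chars.isIn [w] cs = false := by
        rcases hb : PySem.Chars.isIn [w] cs with _ | _
        · rfl
        · exact absurd ((isIn_singleton w cs).mp hb) hmem
      simp [hmem, hni, hj]

-- the B flag (contains rewritten to membership) agrees with A's any-fold flag
-- ===== VERDICT (by name: the statement is the Claim_ definition above) =====
theorem play_char_spec : Claim_equal_play_char := by
  intro char word _
  unfold Spec_play_char play_char play_char_alt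
  show _ = (_, _)
  rw [foldA_spec, mask_eq]
  have hc : ∀ c : Char, ((PySem.List.enumerate word.toList 0).foldl
      (fun (d : PySem.Dict Char (List Int)) p => d.modify p.2 [] (· ++ [p.1]))
      PySem.Dict.empty).contains c = decide (c ∈ word.toList) := positions_contains word.toList
  simp only [Bool.false_or]
  rw [flag_eq]
  rcases h : PySem.List.pyGet? char.toList (-1) with _ | c
  · simp
  · simp [hc c]
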